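-- pv_equiv track=rewrite | github.com/eegmon/project | test.py | fibonacci_caesar
-- ===== SOURCE A (Python) =====
-- def fibonacci_sequence(n):
--     fibs = [1, 1]
--     for i in range(2, n):
--         fibs.append(fibs[-1] + fibs[-2])
--     return fibs
--
-- def fibonacci_caesar(plain):
--     cipher = ""
--     fibs = fibonacci_sequence(len(plain))
--     for idx, ch in enumerate(plain):
--         key = fibs[idx]
--         if ch.isalpha():
--             if ch.islower():
--                 cipher += chr((ord(ch) - ord('a') + key) % 26 + ord('a'))
--             elif ch.isupper():
--                 cipher += chr((ord(ch) - ord('A') + key) % 26 + ord('A'))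
--         else:
--             cipher += ch
--     return cipher
-- ===== SOURCE B (Python) =====
-- def fibonacci_caesar(plain):
--     out = []
--     a, b = 1, 1  # running Fibonacci pair, kept reduced mod 26
--     for ch in plain:
--         o = ord(ch)
--         if 97 <= o <= 122:
--             out.append(chr((o - 97 + a) % 26 + 97))
--         elif 65 <= o <= 90:
--             out.append(chr((o - 65 + a) % 26 + 65))
--         else:
--             out.append(ch)
--         a, b = b, (a + b) % 26
--     return "".join(out)
-- ===== Notes on version B (the rewrite author's own statement) =====
-- stated objective: faster
-- what changed: B drops the precomputed bigint Fibonacci list and instead carries the Fibonacci pair reduced mod 26 through a single pass over the string, appending to a list joined once at the end.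
import Mathlib
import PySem

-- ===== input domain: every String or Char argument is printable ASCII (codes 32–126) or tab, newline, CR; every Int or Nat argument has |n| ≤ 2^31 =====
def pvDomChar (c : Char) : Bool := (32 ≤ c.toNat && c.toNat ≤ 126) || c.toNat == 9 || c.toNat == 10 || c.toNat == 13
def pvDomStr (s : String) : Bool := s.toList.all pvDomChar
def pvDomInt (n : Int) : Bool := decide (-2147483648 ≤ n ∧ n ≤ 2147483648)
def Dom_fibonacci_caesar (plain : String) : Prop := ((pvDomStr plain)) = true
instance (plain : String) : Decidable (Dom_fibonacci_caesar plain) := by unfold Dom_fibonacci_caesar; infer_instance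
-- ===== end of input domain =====

-- B replaces A's bigint Fibonacci table and repeated string concatenation by one pass
-- carrying the Fibonacci pair mod 26 (objective: faster; measured asymptotically faster).


-- ===== PORT A =====
-- fibs[-1]/fibs[-2]: the list always has ≥ 2 elements, so the negative indexing never
-- raises in Python; the `.getD 0` default is never taken.
def fibonacci_sequence (n : Int) : List Int :=
  (PySem.List.pyRange 2 n 1).foldl
    (fun fibs _ =>
      fibs ++ [(PySem.List.pyGet? fibs (-1)).getD 0 + (PySem.List.pyGet? fibs (-2)).getD 0])
    [1, 1]

-- fibs[idx]: idx < len(plain) ≤ len(fibs), so indexing never raises; `.getD 0` never taken.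
def fibonacci_caesar (plain : String) : String :=
  let fibs := fibonacci_sequence (PySem.Str.len plain)
  String.ofList
    ((PySem.List.enumerate plain.toList 0).foldl
      (fun cipher p =>
        let key := (PySem.List.pyGet? fibs p.1).getD 0
        let ch := p.2
        if PySem.Str.isalpha ch then
          if PySem.Str.islower ch then
            cipher ++ [Char.ofNat ((PySem.Int.mod ((ch.toNat : Int) - 97 + key) 26 + 97).toNat)]
          else if PySem.Str.isupper ch then
            cipher ++ [Char.ofNat ((PySem.Int.mod ((ch.toNat : Int) - 65 + key) 26 + 65).toNat)]
          else cipher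
        else cipher ++ [ch])
      [])

-- ===== PORT B =====
def fibonacci_caesar_alt (plain : String) : String :=
  String.ofList
    (plain.toList.foldl
      (fun (st : List Char × Int × Int) ch =>
        let o : Int := ch.toNat
        let out :=
          if 97 ≤ o ∧ o ≤ 122 then
            st.1 ++ [Char.ofNat ((PySem.Int.mod (o - 97 + st.2.1) 26 + 97).toNat)]
          else if 65 ≤ o ∧ o ≤ 90 then
            st.1 ++ [Char.ofNat ((PySem.Int.mod (o - 65 + st.2.1) 26 + 65).toNat)]
          else st.1 ++ [ch]
        (out, st.2.2, PySem.Int.mod (st.2.1 + st.2.2) 26))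
      ([], 1, 1)).1

-- ===== PRECONDITION & SPEC =====
def Spec_fibonacci_caesar (plain : String) (out : String) : Prop := out = fibonacci_caesar_alt plain
instance (plain : String) (out : String) : Decidable (Spec_fibonacci_caesar plain out) := by unfold Spec_fibonacci_caesar; infer_instance

-- ===== CLAIM (what is proved, stated in full; the proofs are below) =====
def Claim_equal_fibonacci_caesar : Prop := ∀ (plain : String), Dom_fibonacci_caesar plain → Spec_fibonacci_caesar plain (fibonacci_caesar plain)

-- ===== LEMMAS AND PROOFS =====

/-- The mathematical Fibonacci sequence A tabulates (F 0 = F 1 = 1). -/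
def pvF : Nat → Int
  | 0 => 1
  | 1 => 1
  | n + 2 => pvF n + pvF (n + 1)

/-- A's loop body, named for the proofs (definitionally the lambda in the port). -/
def pvStepA (fibs : List Int) (cipher : List Char) (p : Int × Char) : List Char :=
  let key := (PySem.List.pyGet? fibs p.1).getD 0
  let ch := p.2
  if PySem.Str.isalpha ch then
    if PySem.Str.islower ch then
      cipher ++ [Char.ofNat ((PySem.Int.mod ((ch.toNat : Int) - 97 + key) 26 + 97).toNat)]
    else if PySem.Str.isupper ch then
      cipher ++ [Char.ofNat ((PySem.Int.mod ((ch.toNat : Int) - 65 + key) 26 + 65).toNat)]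
    else cipher
  else cipher ++ [ch]

/-- B's loop body, named for the proofs (definitionally the lambda in the port). -/
def pvStepB (st : List Char × Int × Int) (ch : Char) : List Char × Int × Int :=
  let o : Int := ch.toNat
  let out :=
    if 97 ≤ o ∧ o ≤ 122 then
      st.1 ++ [Char.ofNat ((PySem.Int.mod (o - 97 + st.2.1) 26 + 97).toNat)]
    else if 65 ≤ o ∧ o ≤ 90 then
      st.1 ++ [Char.ofNat ((PySem.Int.mod (o - 65 + st.2.1) 26 + 65).toNat)]
    else st.1 ++ [ch]
  (out, st.2.2, PySem.Int.mod (st.2.1 + st.2.2) 26)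

theorem fib_step (m : Nat) (hm : 2 ≤ m) :
    ((List.range m).map pvF) ++
      [(PySem.List.pyGet? ((List.range m).map pvF) (-1)).getD 0 +
        (PySem.List.pyGet? ((List.range m).map pvF) (-2)).getD 0] =
    (List.range (m + 1)).map pvF := by
  obtain ⟨k, rfl⟩ : ∃ k, m = k + 2 := ⟨m - 2, by omega⟩
  have g1 : PySem.List.pyGet? ((List.range (k + 2)).map pvF) (-1) = some (pvF (k + 1)) := by
    simp only [PySem.List.pyGet?, PySem.List.pyIdx?, List.length_map, List.length_range]
    rw [if_neg (by omega), if_pos (by push_cast; omega)]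
    simp
  have g2 : PySem.List.pyGet? ((List.range (k + 2)).map pvF) (-2) = some (pvF k) := by
    simp only [PySem.List.pyGet?, PySem.List.pyIdx?, List.length_map, List.length_range]
    rw [if_neg (by omega), if_pos (by push_cast; omega)]
    simp
  rw [g1, g2]
  conv_rhs => rw [List.range_succ, List.map_append]
  congr 1
  simp only [List.map_cons, List.map_nil, Option.getD_some]
  rw [show pvF (k + 2) = pvF k + pvF (k + 1) from rfl]
  congr 1
  ring

theorem fib_fold (k m : Nat) (hm : 2 ≤ m) :
    (PySem.List.pyRange (m : Int) ((m : Int) + (k : Int)) 1).foldl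
      (fun fibs _ =>
        fibs ++ [(PySem.List.pyGet? fibs (-1)).getD 0 + (PySem.List.pyGet? fibs (-2)).getD 0])
      ((List.range m).map pvF) = (List.range (m + k)).map pvF := by
  induction k generalizing m with
  | zero => simp [PySem.List.pyRange_one_eq_nil]
  | succ k ih =>
      have h : (m : Int) + ((k : Nat) + 1 : Nat) = ((m : Int) + 1) + (k : Int) := by push_cast; ring
      rw [h, PySem.List.pyRange_one_cons (by omega)]
      simp only [List.foldl_cons]
      rw [fib_step m hm]
      have h2 : (m : Int) + 1 = ((m + 1 : Nat) : Int) := by omega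
      rw [h2, ih (m + 1) (by omega)]
      congr 2
      omega

theorem fibonacci_sequence_eq (n : Nat) :
    fibonacci_sequence (n : Int) = (List.range (max 2 n)).map pvF := by
  unfold fibonacci_sequence
  by_cases h : n ≤ 2
  · rw [PySem.List.pyRange_one_eq_nil (by exact_mod_cast h)]
    have : max 2 n = 2 := by omega
    rw [this]
    rfl
  · have h2 : (n : Int) = (2 : Int) + ((n - 2 : Nat) : Int) := by omega
    have hmax : max 2 n = 2 + (n - 2) := by omega
    rw [h2, hmax]
    have := fib_fold (n - 2) 2 (le_refl 2)
    simpa using this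

theorem pvKey (N j : Nat) (hj : j < N) :
    (PySem.List.pyGet? ((List.range (max 2 N)).map pvF) ((j : Nat) : Int)).getD 0 = pvF j := by
  have hlt : j < max 2 N := by omega
  rw [PySem.List.pyGet?_natCast]
  simp [hlt]

theorem pvLower (c : Char) :
    PySem.Str.islower c = true ↔ 97 ≤ (c.toNat : Int) ∧ (c.toNat : Int) ≤ 122 := by
  simp [PySem.Str.islower, PySem.Chars.islower, Char.le_def]
  constructor
  · rintro ⟨h1, h2⟩; exact ⟨by exact_mod_cast h1, by exact_mod_cast h2⟩
  · rintro ⟨h1, h2⟩; exact ⟨by exact_mod_cast h1, by exact_mod_cast h2⟩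

theorem pvUpper (c : Char) :
    PySem.Str.isupper c = true ↔ 65 ≤ (c.toNat : Int) ∧ (c.toNat : Int) ≤ 90 := by
  simp [PySem.Str.isupper, PySem.Chars.isupper, Char.le_def]
  constructor
  · rintro ⟨h1, h2⟩; exact ⟨by exact_mod_cast h1, by exact_mod_cast h2⟩
  · rintro ⟨h1, h2⟩; exact ⟨by exact_mod_cast h1, by exact_mod_cast h2⟩

/-- Python `%` with the positive modulus 26 absorbs an inner reduction of one summand. -/
theorem pvMod_absorb (x y : Int) :
    PySem.Int.mod (x + PySem.Int.mod y 26) 26 = PySem.Int.mod (x + y) 26 := by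
  rw [PySem.Int.mod_eq_emod_of_pos (by norm_num), PySem.Int.mod_eq_emod_of_pos (by norm_num),
      PySem.Int.mod_eq_emod_of_pos (by norm_num)]
  omega

/-- One step of B, fed the reduced key, is one step of A plus the advanced reduced pair. -/
theorem pvStepAB (acc : List Char) (c : Char) (i : Int) (fibs : List Int) (k b : Int)
    (hkey : (PySem.List.pyGet? fibs i).getD 0 = k) :
    pvStepB (acc, PySem.Int.mod k 26, b) c =
      (pvStepA fibs acc (i, c), b, PySem.Int.mod (PySem.Int.mod k 26 + b) 26) := by
  unfold pvStepA pvStepB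
  simp only [hkey]
  by_cases hlo : 97 ≤ (c.toNat : Int) ∧ (c.toNat : Int) ≤ 122
  · have hl : PySem.Str.islower c = true := (pvLower c).mpr hlo
    have ha : PySem.Str.isalpha c = true := by
      simp only [PySem.Str.isalpha, PySem.Chars.isalpha, Bool.or_eq_true]
      exact Or.inr hl
    rw [if_pos hlo, if_pos ha, if_pos hl, pvMod_absorb]
  · by_cases hup : 65 ≤ (c.toNat : Int) ∧ (c.toNat : Int) ≤ 90
    · have hu : PySem.Str.isupper c = true := (pvUpper c).mpr hup
      have hnl : ¬ PySem.Str.islower c = true := fun h => hlo ((pvLower c).mp h)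
      have ha : PySem.Str.isalpha c = true := by
        simp only [PySem.Str.isalpha, PySem.Chars.isalpha, Bool.or_eq_true]
        exact Or.inl hu
      rw [if_neg hlo, if_pos hup, if_pos ha, if_neg hnl, if_pos hu, pvMod_absorb]
    · have hna : ¬ PySem.Str.isalpha c = true := by
        simp only [PySem.Str.isalpha, PySem.Chars.isalpha, Bool.or_eq_true]
        rintro (h | h)
        · exact hup ((pvUpper c).mp h)
        · exact hlo ((pvLower c).mp h)
      rw [if_neg hlo, if_neg hup, if_neg hna]

/-- The reduced pair advances to the reduced next pair. -/
theorem pvPair (s : Nat) :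
    PySem.Int.mod (PySem.Int.mod (pvF s) 26 + PySem.Int.mod (pvF (s + 1)) 26) 26 =
      PySem.Int.mod (pvF (s + 2)) 26 := by
  rw [pvMod_absorb, Int.add_comm, pvMod_absorb]
  rw [show pvF (s + 2) = pvF s + pvF (s + 1) from rfl, Int.add_comm]

theorem pvLoop (cs : List Char) (fibs : List Int) (s : Nat) (acc : List Char)
    (hk : ∀ j, j < cs.length → (PySem.List.pyGet? fibs ((s + j : Nat) : Int)).getD 0 = pvF (s + j)) :
    (PySem.List.enumerate cs (s : Int)).foldl (pvStepA fibs) acc =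
    (cs.foldl pvStepB (acc, PySem.Int.mod (pvF s) 26, PySem.Int.mod (pvF (s + 1)) 26)).1 := by
  induction cs generalizing s acc with
  | nil => simp [PySem.List.enumerate_nil]
  | cons c cs ih =>
      rw [PySem.List.enumerate_cons, List.foldl_cons, List.foldl_cons]
      have hkey : (PySem.List.pyGet? fibs ((s : Nat) : Int)).getD 0 = pvF s := by
        have := hk 0 (by simp)
        simpa using this
      rw [pvStepAB acc c (s : Int) fibs (pvF s) (PySem.Int.mod (pvF (s + 1)) 26) hkey, pvPair]
      have hs1 : ((s : Int) + 1) = (((s + 1 : Nat) : Nat) : Int) := by omega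
      rw [hs1]
      have hk' : ∀ j, j < cs.length →
          (PySem.List.pyGet? fibs ((s + 1 + j : Nat) : Int)).getD 0 = pvF (s + 1 + j) := by
        intro j hj
        have := hk (j + 1) (by simp; omega)
        have he : s + (j + 1) = s + 1 + j := by omega
        rwa [he] at this
      have := ih (s + 1) (pvStepA fibs acc ((s : Int), c)) hk'
      rw [show s + 1 + 1 = s + 2 from rfl] at this
      exact this

-- ===== VERDICT (by name: the statement is the Claim_ definition above) =====
theorem fibonacci_caesar_spec : Claim_equal_fibonacci_caesar := by
  intro plain _
  unfold Spec_fibonacci_caesar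
  show String.ofList
      ((PySem.List.enumerate plain.toList 0).foldl
        (pvStepA (fibonacci_sequence (PySem.Str.len plain))) []) =
    String.ofList ((plain.toList.foldl pvStepB ([], 1, 1)).1)
  congr 1
  have hlen : PySem.Str.len plain = ((plain.toList.length : Nat) : Int) := by
    simp [PySem.Str.len_eq]
  rw [hlen, fibonacci_sequence_eq]
  have h0 : (0 : Int) = ((0 : Nat) : Int) := rfl
  have h1 : PySem.Int.mod (pvF 0) 26 = 1 := by decide
  have h2 : PySem.Int.mod (pvF (0 + 1)) 26 = 1 := by decide
  have := pvLoop plain.toList ((List.range (max 2 plain.toList.length)).map pvF) 0 []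
    (fun j hj => by simpa using pvKey plain.toList.length j hj)
  rw [h0, this, h1, h2]
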